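-- pv_equiv track=rewrite | github.com/ShaoYoung/Introduction_to_Python_Seminars | Seminar_5/sem_5_2.py | find_increasing_successions
-- ===== SOURCE A (Python) =====
-- def find_increasing_successions(list_numbers):
--     increasing_successions = []
--     for i in range(0, len(list_numbers)):
--         temp = list_numbers[i]
--         temp_list = [list_numbers[i]]
--         for j in range(i, len(list_numbers)):
--             if list_numbers[j] > temp:
--                 temp_list.append(list_numbers[j])
--                 temp = list_numbers[j]
--         if len(temp_list) > 1:
--             increasing_successions.append(temp_list)
--     return increasing_successions
-- ===== SOURCE B (Python) =====
-- def find_increasing_successions(list_numbers):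
--     # Single right-to-left pass: maintain the record chain (left-to-right strict
--     # maxima) of the current suffix; for each element x the chain becomes x
--     # followed by the previous chain with its prefix of values <= x dropped.
--     result = []
--     chain = []
--     for x in reversed(list_numbers):
--         k = 0
--         while k < len(chain) and chain[k] <= x:
--             k += 1
--         chain = [x] + chain[k:]
--         if len(chain) > 1:
--             result.append(chain)
--     result.reverse()
--     return result
-- ===== Notes on version B (the rewrite author's own statement) =====
-- stated objective: alternative
-- what changed: A rescans the whole suffix from every start index with a nested loop; B makes one right-to-left pass that maintains the record chain of the current suffix incrementally (new chain = element plus previous chain with its <=x prefix dropped), collecting chains of length > 1.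
import Mathlib
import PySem

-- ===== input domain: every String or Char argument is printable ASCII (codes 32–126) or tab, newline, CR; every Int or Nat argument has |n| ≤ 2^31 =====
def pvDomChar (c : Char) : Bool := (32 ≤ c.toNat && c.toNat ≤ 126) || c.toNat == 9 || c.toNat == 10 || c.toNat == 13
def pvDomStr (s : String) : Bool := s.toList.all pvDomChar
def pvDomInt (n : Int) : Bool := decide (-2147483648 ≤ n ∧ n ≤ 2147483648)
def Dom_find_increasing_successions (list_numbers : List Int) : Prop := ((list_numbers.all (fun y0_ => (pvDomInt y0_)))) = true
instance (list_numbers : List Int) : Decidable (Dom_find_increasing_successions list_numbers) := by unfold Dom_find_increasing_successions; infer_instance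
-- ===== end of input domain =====

-- B replaces A's quadratic per-start rescans by one right-to-left pass that reuses
-- the record chain of the previous suffix (alternative decomposition).


-- ===== PORT A =====
-- inner loop: for j in range(i, len): if l[j] > temp: temp_list.append(l[j]); temp = l[j]
-- (iterating j over range(i,len) reading l[j] = folding over the suffix l[i:], element by element)
def pvAInner : List Int → Int → List Int → Int × List Int
  | [], temp, temp_list => (temp, temp_list)
  | x :: xs, temp, temp_list =>
      if x > temp then pvAInner xs x (temp_list ++ [x]) else pvAInner xs temp temp_list

-- outer loop over i in range(0, len): temp = l[i]; temp_list = [l[i]]; inner from j = i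
def find_increasing_successions (list_numbers : List Int) : List (List Int) :=
  match list_numbers with
  | [] => []
  | x :: xs =>
      let temp_list := (pvAInner (x :: xs) x [x]).2
      (if temp_list.length > 1 then [temp_list] else []) ++ find_increasing_successions xs

-- ===== PORT B =====
-- the inner while loop: drop the leading elements of chain that are ≤ x
def pvDropLe (x : Int) : List Int → List Int
  | [] => []
  | y :: ys => if y ≤ x then pvDropLe x ys else y :: ys

-- one step of B's loop body: chain = [x] + chain[k:]; append chain to result if len > 1
def pvBStep (st : List Int × List (List Int)) (x : Int) : List Int × List (List Int) :=
  let chain := x :: pvDropLe x st.1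
  (chain, if chain.length > 1 then st.2 ++ [chain] else st.2)

-- for x in reversed(list_numbers): …  ; result.reverse()
def find_increasing_successions_alt (list_numbers : List Int) : List (List Int) :=
  (list_numbers.reverse.foldl pvBStep ([], [])).2.reverse

-- ===== PRECONDITION & SPEC =====
def Spec_find_increasing_successions (list_numbers : List Int) (out : List (List Int)) : Prop := out = find_increasing_successions_alt list_numbers
instance (list_numbers : List Int) (out : List (List Int)) : Decidable (Spec_find_increasing_successions list_numbers out) := by unfold Spec_find_increasing_successions; infer_instance

-- ===== CLAIM (what is proved, stated in full; the proofs are below) =====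
def Claim_equal_find_increasing_successions : Prop := ∀ (list_numbers : List Int), Dom_find_increasing_successions list_numbers → Spec_find_increasing_successions list_numbers (find_increasing_successions list_numbers)

-- ===== LEMMAS AND PROOFS =====

-- the strict running records of a list that exceed a threshold t
def pvAbove (t : Int) : List Int → List Int
  | [] => []
  | x :: xs => if x > t then x :: pvAbove x xs else pvAbove t xs

-- the record chain (left-to-right strict maxima) of a list
def pvRecs : List Int → List Int
  | [] => []
  | x :: xs => x :: pvDropLe x (pvRecs xs)

-- chains B collects, indexed from the left (reference form of B's loop)
def pvChains : List Int → List (List Int)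
  | [] => []
  | x :: xs =>
      let c := x :: pvDropLe x (pvRecs xs)
      (if c.length > 1 then [c] else []) ++ pvChains xs

theorem pvAInner_spec : ∀ (s : List Int) (t : Int) (tl : List Int),
    (pvAInner s t tl).2 = tl ++ pvAbove t s := by
  intro s
  induction s with
  | nil => intro t tl; simp [pvAInner, pvAbove]
  | cons x xs ih =>
      intro t tl
      by_cases h : x > t
      · simp [pvAInner, pvAbove, h, ih]
      · simp [pvAInner, pvAbove, h, ih]

theorem pvDropLe_dropLe : ∀ (L : List Int) (x t : Int), x ≤ t →
    pvDropLe t (pvDropLe x L) = pvDropLe t L := by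
  intro L
  induction L with
  | nil => intro x t _; simp [pvDropLe]
  | cons y ys ih =>
      intro x t hxt
      by_cases h : y ≤ x
      · have h' : y ≤ t := le_trans h hxt
        simp [pvDropLe, h, h', ih x t hxt]
      · have h2 : ¬ y ≤ x := h
        simp [pvDropLe, h2]

theorem pvAbove_eq_dropLe_recs : ∀ (s : List Int) (t : Int),
    pvAbove t s = pvDropLe t (pvRecs s) := by
  intro s
  induction s with
  | nil => intro t; simp [pvAbove, pvRecs, pvDropLe]
  | cons x xs ih =>
      intro t
      by_cases h : x > t
      · have hnx : ¬ x ≤ t := not_le.mpr h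
        simp [pvAbove, pvRecs, pvDropLe, h, hnx, ih x]
      · have hx : x ≤ t := not_lt.mp h
        simp [pvAbove, pvRecs, pvDropLe, h, hx,
          pvDropLe_dropLe (pvRecs xs) x t hx, ih t]

-- B's fold computes the record chain and (reversed) the reference chain list
theorem pvBFold_eq : ∀ (l : List Int),
    l.reverse.foldl pvBStep ([], []) = (pvRecs l, (pvChains l).reverse) := by
  intro l
  induction l with
  | nil => simp [pvRecs, pvChains]
  | cons x xs ih =>
      have : (x :: xs).reverse.foldl pvBStep ([], [])
          = pvBStep (xs.reverse.foldl pvBStep ([], [])) x := by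
        simp [List.reverse_cons, List.foldl_append]
      rw [this, ih]
      simp only [pvBStep, pvRecs, pvChains]
      split_ifs <;> simp

theorem alt_eq_chains (l : List Int) :
    find_increasing_successions_alt l = pvChains l := by
  unfold find_increasing_successions_alt
  rw [pvBFold_eq, List.reverse_reverse]

theorem a_eq_chains : ∀ (l : List Int),
    find_increasing_successions l = pvChains l := by
  intro l
  induction l with
  | nil => simp [find_increasing_successions, pvChains]
  | cons x xs ih =>
      have hx : ¬ x > x := lt_irrefl x
      have hchain : (pvAInner (x :: xs) x [x]).2 = x :: pvDropLe x (pvRecs xs) := by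
        rw [pvAInner_spec]
        simp [pvAbove, pvAbove_eq_dropLe_recs]
      simp only [find_increasing_successions, pvChains, hchain, ih]

-- ===== VERDICT (by name: the statement is the Claim_ definition above) =====
theorem find_increasing_successions_spec : Claim_equal_find_increasing_successions := by
  intro l _
  unfold Spec_find_increasing_successions
  rw [a_eq_chains, alt_eq_chains]
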